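-- pv_equiv track=rewrite | github.com/julianowicka/python-exercises | promocja.py | milk
-- ===== SOURCE A (Python) =====
-- def milk(a):
--     empty = 0
--     while a - 3 >= 0:
--         a -= 2
--         empty += 3
--     if a + 1 == 3:
--         empty += 3
--     else:
--         empty += a
--     return empty
-- ===== SOURCE B (Python) =====
-- def milk(a):
--     # Closed form: for a >= 2 the loop yields floor(3*a/2); below 2 the input is returned unchanged.
--     if a >= 2:
--         return 3 * a // 2
--     return a
-- ===== Notes on version B (the rewrite author's own statement) =====
-- stated objective: faster
-- what changed: Replaced the decrement-by-2 exchange loop with a closed-form floor(3a/2) formula (return a unchanged below 2).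
import Mathlib
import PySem

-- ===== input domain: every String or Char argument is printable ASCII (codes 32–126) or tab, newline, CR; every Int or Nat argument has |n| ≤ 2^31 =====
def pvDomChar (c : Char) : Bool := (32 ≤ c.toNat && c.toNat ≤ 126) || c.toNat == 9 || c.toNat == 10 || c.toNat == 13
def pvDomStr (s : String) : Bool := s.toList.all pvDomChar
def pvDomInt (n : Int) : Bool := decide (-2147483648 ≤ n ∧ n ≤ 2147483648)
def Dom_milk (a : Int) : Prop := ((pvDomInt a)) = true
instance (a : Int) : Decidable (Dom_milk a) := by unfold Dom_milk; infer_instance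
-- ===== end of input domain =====

-- B replaces A's decrement-by-2 loop with a closed-form floor(3a/2) formula (objective: faster, O(1) vs O(a)).


-- ===== PORT A =====
-- the while loop: while a - 3 >= 0: a -= 2; empty += 3   (returns final (a, empty))
def milkLoop (a empty : Int) : Int × Int :=
  if a - 3 ≥ 0 then milkLoop (a - 2) (empty + 3) else (a, empty)
termination_by a.toNat
decreasing_by omega

def milk (a : Int) : Int :=
  let p := milkLoop a 0
  let a' := p.1
  let empty := p.2
  if a' + 1 = 3 then empty + 3 else empty + a'

-- ===== PORT B =====
def milk_alt (a : Int) : Int :=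
  if a ≥ 2 then PySem.Int.floordiv (3 * a) 2 else a

-- ===== PRECONDITION & SPEC =====
def Spec_milk (a : Int) (out : Int) : Prop := out = milk_alt a
instance (a : Int) (out : Int) : Decidable (Spec_milk a out) := by unfold Spec_milk; infer_instance

-- ===== CLAIM (what is proved, stated in full; the proofs are below) =====
def Claim_equal_milk : Prop := ∀ (a : Int), Dom_milk a → Spec_milk a (milk a)

-- ===== LEMMAS AND PROOFS =====

-- accumulator lemma: running the loop with accumulator e adds e to the empty count
theorem milkLoop_acc (a e : Int) :
    milkLoop a e = ((milkLoop a 0).1, e + (milkLoop a 0).2) := by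
  by_cases h : a - 3 ≥ 0
  · rw [milkLoop, if_pos h, milkLoop_acc (a - 2) (e + 3)]
    conv_rhs => rw [milkLoop]
    rw [if_pos h, milkLoop_acc (a - 2) (0 + 3)]
    simp; ring
  · rw [milkLoop, if_neg h]
    conv_rhs => rw [milkLoop, if_neg h]
    simp
termination_by a.toNat
decreasing_by all_goals omega

theorem milk_step (a : Int) (h : a - 3 ≥ 0) : milk a = milk (a - 2) + 3 := by
  unfold milk
  rw [show milkLoop a 0 = milkLoop (a-2) (0+3) from by rw [milkLoop, if_pos h]]
  rw [milkLoop_acc (a-2) (0+3)]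
  simp only
  split <;> ring

theorem milk_base (a : Int) (h : ¬ a - 3 ≥ 0) : milk a = if a + 1 = 3 then 3 else a := by
  unfold milk
  rw [milkLoop, if_neg h]
  simp only
  split <;> omega

theorem fdiv_two (n : Int) : Int.fdiv n 2 = n / 2 := by
  rw [Int.fdiv_eq_ediv]
  simp

theorem milk_eq_alt (a : Int) : milk a = milk_alt a := by
  by_cases h : a - 3 ≥ 0
  · rw [milk_step a h, milk_eq_alt (a - 2)]
    unfold milk_alt
    simp only [PySem.Int.floordiv, fdiv_two]
    split_ifs <;> omega
  · rw [milk_base a h]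
    unfold milk_alt
    simp only [PySem.Int.floordiv, fdiv_two]
    split_ifs <;> omega
termination_by a.toNat
decreasing_by all_goals omega

-- ===== VERDICT (by name: the statement is the Claim_ definition above) =====
theorem milk_spec : Claim_equal_milk := by
  intro a _
  unfold Spec_milk
  exact milk_eq_alt a
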